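-- pv_equiv track=rewrite | github.com/octomil/octomil-python | octomil/sources/resolver.py | _parse_explicit_source
-- ===== SOURCE A (Python) =====
-- from typing import Dict, Optional
--
-- def _parse_explicit_source(name: str) -> Optional[tuple[str, str]]:
--     """Parse ``hf:org/model`` → ``("hf", "org/model")``. Returns None if no prefix."""
--     for prefix in ("hf:", "huggingface:", "ollama:", "kaggle:"):
--         if name.startswith(prefix):
--             source = prefix.rstrip(":")
--             if source == "huggingface":
--                 source = "hf"
--             return source, name[len(prefix):]
--     return None
-- ===== SOURCE B (Python) =====
-- _CANONICAL = {"hf": "hf", "huggingface": "hf", "ollama": "ollama", "kaggle": "kaggle"}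
--
--
-- def _parse_explicit_source(name):
--     """Parse ``hf:org/model`` -> ("hf", "org/model"); None if no known prefix."""
--     idx = name.find(":")
--     if idx == -1:
--         return None
--     canonical = _CANONICAL.get(name[:idx])
--     if canonical is None:
--         return None
--     return canonical, name[idx + 1:]
-- ===== Notes on version B (the rewrite author's own statement) =====
-- stated objective: idiomatic
-- what changed: B locates the first colon once (str.find), slices the name into key and rest, and canonicalises the key through one lookup table, instead of A's sequential startswith probing of four prefix literals with rstrip-based canonicalisation.
import Mathlib
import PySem

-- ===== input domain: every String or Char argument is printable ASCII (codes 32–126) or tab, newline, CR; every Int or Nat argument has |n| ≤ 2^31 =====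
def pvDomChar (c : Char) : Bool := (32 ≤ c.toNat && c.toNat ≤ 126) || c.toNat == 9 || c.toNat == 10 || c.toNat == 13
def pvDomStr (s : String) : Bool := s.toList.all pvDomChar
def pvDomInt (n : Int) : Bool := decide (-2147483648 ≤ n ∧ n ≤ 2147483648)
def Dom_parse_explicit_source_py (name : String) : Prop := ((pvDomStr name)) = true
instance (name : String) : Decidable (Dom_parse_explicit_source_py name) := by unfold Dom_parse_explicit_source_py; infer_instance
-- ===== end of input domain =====

-- B replaces A's sequential startswith probing by find-colon + slice + one lookup table (idiomatic).

-- ===== PORT A =====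
-- exact port of str.rstrip(":") (the only stripped char is ASCII ':')
def pvRstripColon (cs : List Char) : List Char := (cs.reverse.dropWhile (· == ':')).reverse

-- the for-loop over the prefix tuple, with early return
def pvALoop (name : String) : List String → Option (String × String)
  | [] => none
  | p :: ps =>
    if PySem.Str.startswith name p then
      let source := String.ofList (pvRstripColon p.toList)
      let source := if source = "huggingface" then "hf" else source
      some (source, PySem.Str.slice name (some (PySem.Str.len p : Int)) none)
    else pvALoop name ps

def parse_explicit_source_py (name : String) : Option (String × String) :=
  pvALoop name ["hf:", "huggingface:", "ollama:", "kaggle:"]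

-- ===== PORT B =====
def pvCanonical : PySem.Dict String String :=
  ((((PySem.Dict.empty).insert "hf" "hf").insert "huggingface" "hf").insert "ollama" "ollama").insert "kaggle" "kaggle"

def parse_explicit_source_py_alt (name : String) : Option (String × String) :=
  let idx := PySem.Str.find name ":"
  if idx = -1 then none
  else
    match pvCanonical.get? (PySem.Str.slice name none (some idx)) with
    | none => none
    | some c => some (c, PySem.Str.slice name (some (idx + 1)) none)

-- ===== PRECONDITION & SPEC =====
def Spec_parse_explicit_source_py (name : String) (out : Option (String × String)) : Prop := out = parse_explicit_source_py_alt name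
instance (name : String) (out : Option (String × String)) : Decidable (Spec_parse_explicit_source_py name out) := by unfold Spec_parse_explicit_source_py; infer_instance

-- ===== CLAIM (what is proved, stated in full; the proofs are below) =====
def Claim_equal_parse_explicit_source_py : Prop := ∀ (name : String), Dom_parse_explicit_source_py name → Spec_parse_explicit_source_py name (parse_explicit_source_py name)

-- ===== LEMMAS AND PROOFS =====

-- A colon-free key followed by ':' is a prefix of k ++ ':' :: r (k colon-free) iff key = k:
-- the first colon pins the split point.
theorem pvKeyEq : ∀ (key k : List Char), ':' ∉ key → ':' ∉ k → ∀ r : List Char,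
    key ++ [':'] <+: k ++ ':' :: r → key = k := by
  intro key
  induction key with
  | nil =>
    intro k hkey hk r h
    cases k with
    | nil => rfl
    | cons c k' =>
      simp only [List.nil_append, List.cons_append, List.cons_prefix_cons] at h
      exact absurd (h.1 ▸ List.mem_cons_self) hk
  | cons c key' ih =>
    intro k hkey hk r h
    cases k with
    | nil =>
      simp only [List.cons_append, List.nil_append, List.cons_prefix_cons] at h
      exact absurd (h.1 ▸ List.mem_cons_self) hkey
    | cons c' k' =>
      simp only [List.cons_append, List.cons_prefix_cons] at h
      have := ih k' (fun hm => hkey (List.mem_cons_of_mem _ hm))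
        (fun hm => hk (List.mem_cons_of_mem _ hm)) r h.2
      simp [h.1, this]

theorem pvKeyPrefix (k r : List Char) : k ++ [':'] <+: k ++ ':' :: r := by
  refine ⟨r, ?_⟩; simp

theorem pvMain (name : String) :
    parse_explicit_source_py name = parse_explicit_source_py_alt name := by
  simp only [parse_explicit_source_py, parse_explicit_source_py_alt, pvALoop,
    PySem.Str.find_eq, PySem.Str.startswith_eq]
  have hcol : (":" : String).toList = [':'] := rfl
  rw [hcol]
  by_cases hneg : PySem.Chars.find name.toList [':'] = -1
  · -- no colon: every prefix test fails, B returns none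
    have hnc : ':' ∉ name.toList := by
      have := (PySem.Chars.find_eq_neg_one_iff name.toList [':']).mp hneg
      exact fun hm => this ((List.singleton_infix_iff ':' name.toList).mpr hm)
    have hsw : ∀ p : String, ':' ∈ p.toList →
        PySem.Chars.startswith name.toList p.toList = false := by
      intro p hp
      by_contra h
      have := (PySem.Chars.startswith_iff name.toList p.toList).mp
        (by revert h; cases PySem.Chars.startswith name.toList p.toList <;> simp)
      exact hnc (this.sublist.mem hp)
    rw [hsw "hf:" (by decide), hsw "huggingface:" (by decide),
        hsw "ollama:" (by decide), hsw "kaggle:" (by decide), if_pos hneg]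
    simp
  · -- a colon at index n = (find).toNat: decompose name.toList = k ++ ':' :: r
    have hpos : 0 ≤ PySem.Chars.find name.toList [':'] := by
      rcases (PySem.Chars.neg_one_le_find name.toList [':']).lt_or_eq with h | h
      · omega
      · exact absurd h.symm hneg
    obtain ⟨hpre, hmin⟩ := PySem.Chars.find_spec hpos
    set f := PySem.Chars.find name.toList [':'] with hfdef
    set n := f.toNat with hndef
    have hlt : n < name.toList.length := by
      have h1 := hpre.length_le
      simp only [List.length_cons, List.length_nil, List.length_drop] at h1
      omega
    set k := name.toList.take n with hkdef
    set r := name.toList.drop (n + 1) with hrdef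
    have hgot : name.toList[n] = ':' := by
      rcases hpre with ⟨t, ht⟩
      rw [List.drop_eq_getElem_cons hlt] at ht
      exact (List.cons_eq_cons.mp ht.symm).1
    have hdecomp : name.toList = k ++ ':' :: r := by
      rw [hkdef, hrdef, ← hgot, ← List.drop_eq_getElem_cons hlt, List.take_append_drop]
    have hkfree : ':' ∉ k := by
      intro hm
      rw [hkdef] at hm
      obtain ⟨i, hi, hgi⟩ := List.mem_take_iff_getElem.mp hm
      have hi' : i < n := lt_of_lt_of_le hi (by omega)
      refine hmin i hi' ⟨name.toList.drop (i + 1), ?_⟩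
      rw [List.drop_eq_getElem_cons (show i < name.toList.length by omega), hgi]
      rfl
    have hklen : k.length = n := by
      rw [hkdef, List.length_take]; omega
    have hsw : ∀ (key p : String), p.toList = key.toList ++ [':'] → ':' ∉ key.toList →
        PySem.Chars.startswith name.toList p.toList = decide (key.toList = k) := by
      intro key p hp hkey
      rw [hp, hdecomp]
      by_cases he : key.toList = k
      · rw [he]
        simp [(PySem.Chars.startswith_iff _ _).mpr (pvKeyPrefix k r)]
      · have hnp : ¬ (key.toList ++ [':'] <+: k ++ ':' :: r) :=
          fun h => he (pvKeyEq _ _ hkey hkfree r h)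
        simp only [he, decide_false]
        cases hb : PySem.Chars.startswith (k ++ ':' :: r) (key.toList ++ [':'])
        · rfl
        · exact absurd ((PySem.Chars.startswith_iff _ _).mp hb) hnp
    rw [hsw "hf" "hf:" (by decide) (by decide),
        hsw "huggingface" "huggingface:" (by decide) (by decide),
        hsw "ollama" "ollama:" (by decide) (by decide),
        hsw "kaggle" "kaggle:" (by decide) (by decide),
        if_neg hneg]
    have hs1 : PySem.Str.slice name none (some f) = String.ofList k := by
      rw [← String.toList_inj, PySem.Str.toList_slice, PySem.Chars.slice_eq_listSlice,
          PySem.List.slice_to _ hpos]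
      simp [hkdef, hndef]
    have hslice2 : ∀ m : ℤ, m = f + 1 →
        PySem.Str.slice name (some m) none = PySem.Str.slice name (some (f + 1)) none := by
      intro m hm; rw [hm]
    rw [hs1]
    by_cases h1 : ("hf" : String).toList = k
    · simp only [← h1, String.ofList_toList]
      rw [hslice2 (PySem.Str.len ("hf:" : String)) (by
        have hk2 : k.length = 2 := by rw [← h1]; rfl
        have hlen : PySem.Str.len ("hf:" : String) = 3 := by decide
        rw [hlen]; omega)]
      simp [pvCanonical, PySem.Dict.get?, PySem.Dict.insert, PySem.Dict.empty, pvRstripColon]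
    by_cases h2 : ("huggingface" : String).toList = k
    · simp only [← h2, String.ofList_toList]
      rw [hslice2 (PySem.Str.len ("huggingface:" : String)) (by
        have hk2 : k.length = 11 := by rw [← h2]; rfl
        have hlen : PySem.Str.len ("huggingface:" : String) = 12 := by decide
        rw [hlen]; omega)]
      simp [pvCanonical, PySem.Dict.get?, PySem.Dict.insert, PySem.Dict.empty, pvRstripColon]
    by_cases h3 : ("ollama" : String).toList = k
    · simp only [← h3, String.ofList_toList]
      rw [hslice2 (PySem.Str.len ("ollama:" : String)) (by
        have hk2 : k.length = 6 := by rw [← h3]; rfl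
        have hlen : PySem.Str.len ("ollama:" : String) = 7 := by decide
        rw [hlen]; omega)]
      simp [pvCanonical, PySem.Dict.get?, PySem.Dict.insert, PySem.Dict.empty, pvRstripColon]
    by_cases h4 : ("kaggle" : String).toList = k
    · simp only [← h4, String.ofList_toList]
      rw [hslice2 (PySem.Str.len ("kaggle:" : String)) (by
        have hk2 : k.length = 6 := by rw [← h4]; rfl
        have hlen : PySem.Str.len ("kaggle:" : String) = 7 := by decide
        rw [hlen]; omega)]
      simp [pvCanonical, PySem.Dict.get?, PySem.Dict.insert, PySem.Dict.empty, pvRstripColon]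
    · -- no key matches: both sides none
      have hget : pvCanonical.get? (String.ofList k) = none := by
        have e1 : String.ofList k ≠ "hf" := fun h => h1 (by rw [← h]; simp)
        have e2 : String.ofList k ≠ "huggingface" := fun h => h2 (by rw [← h]; simp)
        have e3 : String.ofList k ≠ "ollama" := fun h => h3 (by rw [← h]; simp)
        have e4 : String.ofList k ≠ "kaggle" := fun h => h4 (by rw [← h]; simp)
        simp [pvCanonical, PySem.Dict.get?, PySem.Dict.insert, PySem.Dict.empty]
        exact ⟨Ne.symm e1, Ne.symm e2, Ne.symm e3, Ne.symm e4⟩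
      simp at h1 h2 h3 h4
      simp [h1, h2, h3, h4, hget]

-- ===== VERDICT (by name: the statement is the Claim_ definition above) =====
theorem parse_explicit_source_py_spec : Claim_equal_parse_explicit_source_py := by
  intro name _
  unfold Spec_parse_explicit_source_py
  exact pvMain name
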